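-- pv_equiv track=rewrite | github.com/IntelligentOmics/MirrorNovo | test04.py | converttargetsequence
-- ===== SOURCE A (Python) =====
-- def converttargetsequence(sequence, modification:str):
--     convertsequence_list = []
--     modification_list = {"Oxidation[M]": "M(Oxidation)", "Carbamidomethyl[C]": "C(Carbamidomethylation)"}
--     modification_dict = {}
--     split_mod_list = modification.split(";")[:-1]
--     mod_label = True
--     for onemod in split_mod_list:
--         index, name = onemod.split(",")
--         modification_dict[int(index)] = name
--         if name not in modification_list.keys():
--             return False, sequence
--     if mod_label:
--         for index, aa in enumerate(sequence):
--             if (index+1) in modification_dict.keys():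
--                 convertsequence_list.append(modification_list[modification_dict[index+1]])
--             else:
--                 convertsequence_list.append(aa)
--         if "C" in convertsequence_list:
--             return False, convertsequence_list
--         else:
--             return True, convertsequence_list
-- ===== SOURCE B (Python) =====
-- def converttargetsequence(sequence, modification: str):
--     allowed = {"Oxidation[M]": "M(Oxidation)", "Carbamidomethyl[C]": "C(Carbamidomethylation)"}
--     chars = list(sequence)
--     for entry in modification.split(";")[:-1]:
--         index, name = entry.split(",")
--         i = int(index)
--         if name not in allowed:
--             return False, sequence
--         if 1 <= i <= len(chars):
--             chars[i - 1] = allowed[name]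
--     return ("C" not in chars), chars
-- ===== Notes on version B (the rewrite author's own statement) =====
-- stated objective: simpler
-- what changed: B drops A's index-to-name dict and the second full scan of the sequence: it makes one mutable copy of the sequence's characters and writes each modification's replacement directly into it while parsing, then checks for a leftover 'C'; this removes the per-character dict membership test and lookup of A's rescan.
-- outside the precondition, e.g. on converttargetsequence('AC', '1,Foo;'): A returns (False, 'AC'), B returns (False, 'AC'); on converttargetsequence('AC', 'junk;'): A raises ValueError, B raises ValueError
import Mathlib
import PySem

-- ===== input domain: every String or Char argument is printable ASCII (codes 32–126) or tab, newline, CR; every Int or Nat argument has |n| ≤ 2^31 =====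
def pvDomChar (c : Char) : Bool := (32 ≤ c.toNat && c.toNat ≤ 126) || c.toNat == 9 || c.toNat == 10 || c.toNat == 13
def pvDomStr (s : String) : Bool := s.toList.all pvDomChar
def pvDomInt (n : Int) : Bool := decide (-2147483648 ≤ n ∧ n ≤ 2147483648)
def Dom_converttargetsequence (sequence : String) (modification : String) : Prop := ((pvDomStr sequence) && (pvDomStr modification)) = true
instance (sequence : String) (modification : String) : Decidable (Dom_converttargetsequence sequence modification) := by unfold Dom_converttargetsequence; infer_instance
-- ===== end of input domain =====

-- B applies each modification in place on a mutable copy of the sequence while parsing,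
-- instead of building an index→name dict and then rescanning the whole sequence (objective: simpler decomposition, same cost).

-- ===== PORT A =====
-- the literal dict modification_list
def pvModList : PySem.Dict String String :=
  (PySem.Dict.empty.insert "Oxidation[M]" "M(Oxidation)").insert "Carbamidomethyl[C]" "C(Carbamidomethylation)"

-- A's first for-loop: builds modification_dict; 'none' covers exactly the paths excluded by Pre_:
-- the ValueError of unpacking/int(), and the early 'return False, sequence' whose second
-- component is a str, not a value of the declared list return type.
def convA_parse : List String → PySem.Dict Int String → Option (PySem.Dict Int String)
  | [], d => some d
  | onemod :: rest, d =>
    match PySem.Str.split? onemod "," with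
    | some [index, name] =>
      match PySem.Int.ofStr? index with
      | some i =>
        if pvModList.contains name then convA_parse rest (d.insert i name)
        else none
      | none => none
    | _ => none

def converttargetsequence (sequence : String) (modification : String) : Bool × List String :=
  let split_mod_list := ((PySem.Str.split? modification ";").getD []).dropLast
  match convA_parse split_mod_list PySem.Dict.empty with
  | none => (false, [])
  | some md =>
    let convertsequence_list := (PySem.List.enumerate sequence.toList).foldl
      (fun acc p =>
        if md.contains (p.1 + 1) then acc ++ [pvModList.getD (md.getD (p.1 + 1) "") ""]
        else acc ++ [String.ofList [p.2]]) []
    if "C" ∈ convertsequence_list then (false, convertsequence_list)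
    else (true, convertsequence_list)

-- ===== PORT B =====
def pvAllowed : PySem.Dict String String :=
  (PySem.Dict.empty.insert "Oxidation[M]" "M(Oxidation)").insert "Carbamidomethyl[C]" "C(Carbamidomethylation)"

-- B's single loop: parse each entry and write its replacement into chars in place.
-- 'none' covers exactly the paths Pre_ excludes (ValueError; early non-list return).
def convB_loop : List String → List String → Option (List String)
  | [], chars => some chars
  | entry :: rest, chars =>
    match PySem.Str.split? entry "," with
    | some [index, name] =>
      match PySem.Int.ofStr? index with
      | some i =>
        match pvAllowed.get? name with
        | some repl =>
          convB_loop rest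
            (if 1 ≤ i ∧ i ≤ (chars.length : Int) then chars.set (i - 1).toNat repl else chars)
        | none => none
      | none => none
    | _ => none

def converttargetsequence_alt (sequence : String) (modification : String) : Bool × List String :=
  match convB_loop (((PySem.Str.split? modification ";").getD []).dropLast)
      (sequence.toList.map (fun c => String.ofList [c])) with
  | some chars => (decide ¬ ("C" ∈ chars), chars)
  | none => (false, [])

-- ===== PRECONDITION & SPEC =====
-- one modification entry is well-formed: exactly one ',', int-parsable index, known name
def pvValidEntry (e : String) : Bool :=
  match PySem.Str.split? e "," with
  | some [index, name] =>
    (PySem.Int.ofStr? index).isSome && (name == "Oxidation[M]" || name == "Carbamidomethyl[C]")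
  | _ => false

-- Pre_ excludes modification strings with a malformed entry (Python raises ValueError there)
-- and those with an unknown modification name, where A returns the original str 'sequence'
-- instead of a value of the declared List-String type (B returns the same there).
def Pre_converttargetsequence (sequence : String) (modification : String) : Prop :=
  ∀ e ∈ ((PySem.Str.split? modification ";").getD []).dropLast, pvValidEntry e = true
instance (sequence : String) (modification : String) : Decidable (Pre_converttargetsequence sequence modification) := by unfold Pre_converttargetsequence; infer_instance

def pvWitness_converttargetsequence : String × String := ("AMKC", "2,Oxidation[M];4,Carbamidomethyl[C];")

def Spec_converttargetsequence (sequence : String) (modification : String) (out : Bool × List String) : Prop := out = converttargetsequence_alt sequence modification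
instance (sequence : String) (modification : String) (out : Bool × List String) : Decidable (Spec_converttargetsequence sequence modification out) := by unfold Spec_converttargetsequence; infer_instance

-- ===== CLAIM (what is proved, stated in full; the proofs are below) =====
def Claim_equal_converttargetsequence : Prop := ∀ (sequence : String) (modification : String), Dom_converttargetsequence sequence modification → Pre_converttargetsequence sequence modification → Spec_converttargetsequence sequence modification (converttargetsequence sequence modification)

-- ===== LEMMAS AND PROOFS =====

-- the element A's second loop produces at position j, given the parsed dict d
def pvOutA (d : PySem.Dict Int String) (j : Nat) (c : Char) : String :=
  if d.contains ((j : Int) + 1) then pvModList.getD (d.getD ((j : Int) + 1) "") "" else String.ofList [c]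

-- invariant tying B's chars to A's dict over a fixed sequence
def pvInv (seq : List Char) (d : PySem.Dict Int String) (chars : List String) : Prop :=
  chars.length = seq.length ∧
  ∀ j : Nat, j < seq.length → chars[j]? = some (pvOutA d j (seq[j]!))

lemma pvInv_step (seq : List Char) (d : PySem.Dict Int String) (chars : List String)
    (i : Int) (name repl : String) (hrepl : pvAllowed.get? name = some repl)
    (hinv : pvInv seq d chars) :
    pvInv seq (d.insert i name)
      (if 1 ≤ i ∧ i ≤ (chars.length : Int) then chars.set (i - 1).toNat repl else chars) := by
  obtain ⟨hlen, hidx⟩ := hinv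
  have hname : name = "Oxidation[M]" ∨ name = "Carbamidomethyl[C]" := by
    by_contra hc
    push_neg at hc
    obtain ⟨h1, h2⟩ := hc
    rw [show pvAllowed = (PySem.Dict.empty.insert "Oxidation[M]" "M(Oxidation)").insert "Carbamidomethyl[C]" "C(Carbamidomethylation)" from rfl,
      PySem.Dict.get?_insert_of_ne _ _ h2, PySem.Dict.get?_insert_of_ne _ _ h1] at hrepl
    simp [PySem.Dict.get?_empty] at hrepl
  have hreplval : pvModList.getD name "" = repl := by
    rcases hname with h | h <;> subst h
    · rw [show pvAllowed.get? "Oxidation[M]" = some "M(Oxidation)" from by decide] at hrepl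
      rw [← Option.some.inj hrepl]; decide
    · rw [show pvAllowed.get? "Carbamidomethyl[C]" = some "C(Carbamidomethylation)" from by decide] at hrepl
      rw [← Option.some.inj hrepl]; decide
  constructor
  · split
    · simpa [List.length_set] using hlen
    · exact hlen
  · intro j hj
    by_cases hij : (j : Int) + 1 = i
    · -- position j is the one being modified
      have hr : 1 ≤ i ∧ i ≤ (chars.length : Int) := by constructor <;> omega
      have hjnat : (i - 1).toNat = j := by omega
      have hjlt : j < chars.length := by omega
      have hout : pvOutA (d.insert i name) j (seq[j]!) = repl := by
        unfold pvOutA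
        rw [hij, PySem.Dict.contains_insert_self, if_pos rfl, PySem.Dict.getD_insert_self]
        exact hreplval
      rw [if_pos hr, hjnat, hout]
      simp [hjlt]
    · -- position j untouched
      have hchars : (if 1 ≤ i ∧ i ≤ (chars.length : Int) then chars.set (i - 1).toNat repl else chars)[j]? = chars[j]? := by
        split
        · exact List.getElem?_set_ne (by omega)
        · rfl
      have hout : pvOutA (d.insert i name) j (seq[j]!) = pvOutA d j (seq[j]!) := by
        unfold pvOutA
        rw [PySem.Dict.contains_insert, PySem.Dict.getD_insert]
        have hne : ((j : Int) + 1 == i) = false := by simp; omega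
        rw [hne]
        simp [hij]
      rw [hchars, hidx j hj, hout]

lemma pv_loop_agree (entries : List String) (hv : ∀ e ∈ entries, pvValidEntry e = true)
    (seq : List Char) (d : PySem.Dict Int String) (chars : List String)
    (hinv : pvInv seq d chars) :
    ∃ d' chars', convA_parse entries d = some d' ∧ convB_loop entries chars = some chars' ∧
      pvInv seq d' chars' := by
  induction entries generalizing d chars with
  | nil => exact ⟨d, chars, rfl, rfl, hinv⟩
  | cons e rest ih =>
    have hve : pvValidEntry e = true := hv e (List.mem_cons_self ..)
    have hvrest : ∀ x ∈ rest, pvValidEntry x = true := fun x hx => hv x (List.mem_cons_of_mem _ hx)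
    unfold pvValidEntry at hve
    rcases hsplit : PySem.Str.split? e "," with _ | ls
    · rw [hsplit] at hve; simp at hve
    rw [hsplit] at hve
    rcases ls with _ | ⟨a, _ | ⟨b, _ | ⟨c, t⟩⟩⟩ <;> try simp at hve
    simp only [Bool.and_eq_true, Bool.or_eq_true, beq_iff_eq, Option.isSome_iff_exists] at hve
    obtain ⟨⟨i, hi⟩, hname⟩ := hve
    have hcont : pvModList.contains b = true := by
      rcases hname with h | h <;> subst h <;> decide
    have hget : ∃ repl, pvAllowed.get? b = some repl := by
      rcases hname with h | h <;> subst h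
      · exact ⟨"M(Oxidation)", by decide⟩
      · exact ⟨"C(Carbamidomethylation)", by decide⟩
    obtain ⟨repl, hrepl⟩ := hget
    have hinv' := pvInv_step seq d chars i b repl hrepl hinv
    obtain ⟨d', chars', h1, h2, h3⟩ := ih hvrest (d.insert i b) _ hinv'
    refine ⟨d', chars', ?_, ?_, h3⟩
    · unfold convA_parse
      rw [hsplit]
      dsimp only
      rw [hi]
      dsimp only
      rw [if_pos hcont]
      exact h1
    · unfold convB_loop
      rw [hsplit]
      dsimp only
      rw [hi]
      dsimp only
      rw [hrepl]
      exact h2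

-- fold-with-append of an if-branching body is the corresponding map
lemma pv_scan_eq (seq : List Char) (d : PySem.Dict Int String) :
    (PySem.List.enumerate seq).foldl
      (fun acc p =>
        if d.contains (p.1 + 1) then acc ++ [pvModList.getD (d.getD (p.1 + 1) "") ""]
        else acc ++ [String.ofList [p.2]]) []
    = (PySem.List.enumerate seq).map
      (fun p => if d.contains (p.1 + 1) then pvModList.getD (d.getD (p.1 + 1) "") "" else String.ofList [p.2]) := by
  have hfun : (fun (acc : List String) (p : Int × Char) =>
      if d.contains (p.1 + 1) then acc ++ [pvModList.getD (d.getD (p.1 + 1) "") ""]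
      else acc ++ [String.ofList [p.2]])
    = (fun acc p => acc ++ [if d.contains (p.1 + 1) then pvModList.getD (d.getD (p.1 + 1) "") ""
        else String.ofList [p.2]]) := by
    funext acc p
    split <;> rfl
  rw [hfun, PySem.List.foldl_append_singleton_eq_map, List.nil_append]

lemma pv_scan_chars (seq : List Char) (d : PySem.Dict Int String) (chars : List String)
    (hinv : pvInv seq d chars) :
    (PySem.List.enumerate seq).map
      (fun p => if d.contains (p.1 + 1) then pvModList.getD (d.getD (p.1 + 1) "") "" else String.ofList [p.2])
    = chars := by
  obtain ⟨hlen, hidx⟩ := hinv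
  apply List.ext_getElem
  · simp [PySem.List.length_enumerate, hlen]
  · intro j h1 h2
    have hj : j < seq.length := by simpa [PySem.List.length_enumerate] using h1
    have hgetq := hidx j hj
    rw [List.getElem?_eq_getElem h2] at hgetq
    have hget : chars[j] = pvOutA d j (seq[j]!) := Option.some.inj hgetq
    rw [hget]
    simp [PySem.List.getElem_enumerate, pvOutA, List.getElem!_eq_getElem?_getD, List.getElem?_eq_getElem hj]

-- ===== VERDICT (by name: the statement is the Claim_ definition above) =====
theorem converttargetsequence_spec : Claim_equal_converttargetsequence := by
  intro sequence modification _ hpre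
  unfold Pre_converttargetsequence at hpre
  unfold Spec_converttargetsequence converttargetsequence converttargetsequence_alt
  have hinv0 : pvInv sequence.toList PySem.Dict.empty (sequence.toList.map (fun c => String.ofList [c])) := by
    constructor
    · simp
    · intro j hj
      simp [pvOutA, PySem.Dict.contains_empty, List.getElem?_map, List.getElem?_eq_getElem hj,
        List.getElem!_eq_getElem?_getD]
  obtain ⟨d', chars', h1, h2, h3⟩ :=
    pv_loop_agree (((PySem.Str.split? modification ";").getD []).dropLast) hpre sequence.toList
      PySem.Dict.empty (sequence.toList.map (fun c => String.ofList [c])) hinv0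
  simp only [h1, h2]
  rw [pv_scan_eq, pv_scan_chars sequence.toList d' chars' h3]
  by_cases hc : "C" ∈ chars' <;> simp [hc]
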